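-- pv_equiv track=rewrite | github.com/sunilbpandey/project-euler | src/036/p036.py | make_binary_palindrome
-- ===== SOURCE A (Python) =====
-- def make_binary_palindrome(number: int, odd_length: bool) -> int:
--     # Generate a binary palindrome using given number as the basis
--     # E.g. number = 5 (101 in binary), odd_length = False, returns 45 (101101 in binary)
--     #      number = 5 (101 in binary), odd_length = True, returns 21 (10101 in binary)
--     # Source: https://projecteuler.net/overview=0036
--     result = number
--     if odd_length:
--         number >>= 1
--     while number:
--         result <<= 1
--         result |= number & 1
--         number >>= 1
--     return result
-- ===== SOURCE B (Python) =====
-- def make_binary_palindrome(number: int, odd_length: bool) -> int: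
--     # Build the palindrome from the binary string: mirror (dropping the
--     # middle bit when odd_length) and parse the concatenation once.
--     s = bin(number)[2:]
--     rev = (s[:-1] if odd_length else s)[::-1]
--     return int(s + rev, 2)
-- ===== Notes on version B (the rewrite author's own statement) =====
-- stated objective: idiomatic
-- what changed: B replaces the while-loop with shift/OR bit accumulation by string slicing: take bin(number), mirror it (dropping the middle bit when odd_length) and parse the concatenation with a single int(_, 2).
import Mathlib
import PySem

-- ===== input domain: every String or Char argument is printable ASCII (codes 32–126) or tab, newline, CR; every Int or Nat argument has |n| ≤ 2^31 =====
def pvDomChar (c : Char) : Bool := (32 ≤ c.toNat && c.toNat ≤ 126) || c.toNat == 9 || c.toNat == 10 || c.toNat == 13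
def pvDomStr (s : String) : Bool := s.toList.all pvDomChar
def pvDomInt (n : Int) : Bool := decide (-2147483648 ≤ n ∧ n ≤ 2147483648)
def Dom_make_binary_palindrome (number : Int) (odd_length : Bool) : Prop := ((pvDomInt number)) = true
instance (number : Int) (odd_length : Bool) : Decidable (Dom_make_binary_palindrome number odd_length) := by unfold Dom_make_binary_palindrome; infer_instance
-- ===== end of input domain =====

-- B builds the palindrome by mirroring the binary string and parsing it once,
-- instead of A's while-loop of shifts and ORs (objective: idiomatic).

-- ===== PORT A =====
-- The while-loop of A. Under Pre_ (0 ≤ number) `number` is a Nat; the loop halves it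
-- each step, so we recurse on the Nat. For nonnegative operands Python's
-- `result <<= 1; result |= number & 1` is exactly result*2 + number%2.
def pvALoop (n : Nat) (result : Int) : Int :=
  if n = 0 then result
  else pvALoop (n / 2) (result * 2 + (n % 2 : Nat))

def make_binary_palindrome (number : Int) (odd_length : Bool) : Int :=
  let result := number
  -- `number >>= 1` on a nonnegative int is floor division by 2
  let number := if odd_length then PySem.Int.floordiv number 2 else number
  pvALoop number.toNat result

-- ===== PORT B =====
-- bin(n)[2:] for n ≥ 0, as a list of '0'/'1' characters (MSB first)
def pvBin : Nat → List Char
  | n =>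
    if _h : n ≤ 1 then [if n = 1 then '1' else '0']
    else pvBin (n / 2) ++ [if n % 2 = 1 then '1' else '0']

-- int(s, 2): fold accumulating acc*2 + bit
def pvStep (acc : Int) (c : Char) : Int := acc * 2 + (if c = '1' then 1 else 0)
def pvParseBin (s : List Char) : Int := s.foldl pvStep 0

def make_binary_palindrome_alt (number : Int) (odd_length : Bool) : Int :=
  let s := pvBin number.toNat
  let rev := (if odd_length then s.dropLast else s).reverse
  pvParseBin (s ++ rev)

-- ===== PRECONDITION & SPEC =====
-- Pre_ excludes negative numbers: there Python A never returns (the arithmetic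
-- right shift keeps `number` at -1, an infinite loop).
def Pre_make_binary_palindrome (number : Int) (odd_length : Bool) : Prop := 0 ≤ number
instance (number : Int) (odd_length : Bool) : Decidable (Pre_make_binary_palindrome number odd_length) := by unfold Pre_make_binary_palindrome; infer_instance
def pvWitness_make_binary_palindrome : Int × Bool := (5, true)

def Spec_make_binary_palindrome (number : Int) (odd_length : Bool) (out : Int) : Prop := out = make_binary_palindrome_alt number odd_length
instance (number : Int) (odd_length : Bool) (out : Int) : Decidable (Spec_make_binary_palindrome number odd_length out) := by unfold Spec_make_binary_palindrome; infer_instance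

-- ===== CLAIM (what is proved, stated in full; the proofs are below) =====
def Claim_equal_make_binary_palindrome : Prop := ∀ (number : Int) (odd_length : Bool), Dom_make_binary_palindrome number odd_length → Pre_make_binary_palindrome number odd_length → Spec_make_binary_palindrome number odd_length (make_binary_palindrome number odd_length)

-- ===== LEMMAS AND PROOFS =====

theorem pvParseBin_append (s t : List Char) :
    pvParseBin (s ++ t) = t.foldl pvStep (pvParseBin s) := by
  simp [pvParseBin, List.foldl_append]

-- parsing the binary string of m gives back m
theorem pvParseBin_pvBin (m : Nat) : pvParseBin (pvBin m) = (m : Int) := by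
  induction m using Nat.strong_induction_on with
  | _ m ih =>
    rw [pvBin]
    by_cases h : m ≤ 1
    · interval_cases m <;> simp [pvParseBin, pvStep]
    · rw [dif_neg h, pvParseBin_append, ih (m / 2) (by omega)]
      have h2 : m % 2 = 0 ∨ m % 2 = 1 := by omega
      rcases h2 with h2 | h2 <;> simp [pvStep, h2] <;> omega

-- A's loop consumes the bits of m LSB-first, i.e. folds over (pvBin m).reverse
theorem pvALoop_eq_foldl (m : Nat) (r : Int) (hm : m ≠ 0) :
    pvALoop m r = (pvBin m).reverse.foldl pvStep r := by
  induction m using Nat.strong_induction_on generalizing r with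
  | _ m ih =>
    rw [pvALoop, if_neg hm, pvBin]
    by_cases h : m ≤ 1
    · have : m = 1 := by omega
      subst this
      simp [pvALoop, pvStep]
    · rw [dif_neg h, List.reverse_append, List.reverse_singleton, List.singleton_append,
        List.foldl_cons, ih (m / 2) (by omega) _ (by omega)]
      congr 1
      have h2 : m % 2 = 0 ∨ m % 2 = 1 := by omega
      rcases h2 with h2 | h2 <;> simp [pvStep, h2]

-- dropping the last char of bin(m) gives bin(m/2) (for m ≥ 2)
theorem pvBin_dropLast (m : Nat) (h : ¬ m ≤ 1) :
    (pvBin m).dropLast = pvBin (m / 2) := by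
  rw [pvBin, dif_neg h, List.dropLast_concat]

theorem pvBin_dropLast_small (m : Nat) (h : m ≤ 1) : (pvBin m).dropLast = [] := by
  rw [pvBin, dif_pos h]; rfl

-- ===== VERDICT (by name: the statement is the Claim_ definition above) =====
theorem make_binary_palindrome_spec : Claim_equal_make_binary_palindrome := by
  intro number odd_length _ hpre
  unfold Spec_make_binary_palindrome make_binary_palindrome make_binary_palindrome_alt
  obtain ⟨n, rfl⟩ := Int.eq_ofNat_of_zero_le hpre
  cases odd_length with
  | false =>
    simp only [Bool.false_eq_true, if_false, Int.toNat_natCast]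
    by_cases hn : n = 0
    · subst hn; simp [pvALoop, pvBin, pvParseBin, pvStep]
    · rw [pvALoop_eq_foldl n _ hn, pvParseBin_append, pvParseBin_pvBin]
  | true =>
    have hfd : (PySem.Int.floordiv (n : Int) 2).toNat = n / 2 := by
      rw [PySem.Int.floordiv_eq_ediv_of_pos (by omega : (0:Int) < 2)]
      omega
    simp only [if_true, Int.toNat_natCast, hfd]
    by_cases h : n ≤ 1
    · have h0 : n / 2 = 0 := by omega
      rw [h0, pvBin_dropLast_small n h]
      simp [pvALoop, pvParseBin_pvBin]
    · rw [pvALoop_eq_foldl (n / 2) _ (by omega), pvBin_dropLast n h,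
        pvParseBin_append, pvParseBin_pvBin]
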